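-- pv_equiv track=rewrite | github.com/Amixx/Athar | athar/identity_pipeline.py | _match_steps_by_unique_id
-- ===== SOURCE A (Python) =====
-- def _match_steps_by_unique_id(old_ids: dict[int, str], new_ids: dict[int, str]) -> dict[int, int]:
--     old_first: dict[str, int] = {}
--     old_counts: dict[str, int] = {}
--     for step_id, entity_id in old_ids.items():
--         old_counts[entity_id] = old_counts.get(entity_id, 0) + 1
--         old_first.setdefault(entity_id, step_id)
--     new_first: dict[str, int] = {}
--     new_counts: dict[str, int] = {}
--     for step_id, entity_id in new_ids.items():
--         new_counts[entity_id] = new_counts.get(entity_id, 0) + 1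
--         new_first.setdefault(entity_id, step_id)
--
--     pairs: dict[int, int] = {}
--     for entity_id in sorted(set(old_counts) & set(new_counts)):
--         if old_counts[entity_id] == 1 and new_counts[entity_id] == 1:
--             pairs[old_first[entity_id]] = new_first[entity_id]
--     return pairs
-- ===== SOURCE B (Python) =====
-- def _match_steps_by_unique_id(old_ids: dict[int, str], new_ids: dict[int, str]) -> dict[int, int]:
--     # Sort each side's items by entity, scan runs to keep entities whose run has
--     # length 1, then two-pointer merge the two sorted unique lists.
--     def unique_pairs(ids):
--         items = sorted(ids.items(), key=lambda kv: kv[1])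
--         out = []
--         i, n = 0, len(items)
--         while i < n:
--             j = i + 1
--             while j < n and items[j][1] == items[i][1]:
--                 j += 1
--             if j == i + 1:
--                 out.append((items[i][1], items[i][0]))
--             i = j
--         return out
--
--     olds = unique_pairs(old_ids)
--     news = unique_pairs(new_ids)
--     pairs = []
--     i = j = 0
--     while i < len(olds) and j < len(news):
--         if olds[i][0] < news[j][0]:
--             i += 1
--         elif news[j][0] < olds[i][0]:
--             j += 1
--         else:
--             pairs.append((olds[i][1], news[j][1]))
--             i += 1
--             j += 1
--     return dict(pairs)
-- ===== Notes on version B (the rewrite author's own statement) =====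
-- stated objective: alternative
-- what changed: A builds per-side entity->count and entity->first-step dicts and walks the sorted key intersection testing count==1; B sorts each side's items by entity, run-length-scans the sorted list keeping length-1 runs, and two-pointer merges the two sorted unique lists.
import Mathlib
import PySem

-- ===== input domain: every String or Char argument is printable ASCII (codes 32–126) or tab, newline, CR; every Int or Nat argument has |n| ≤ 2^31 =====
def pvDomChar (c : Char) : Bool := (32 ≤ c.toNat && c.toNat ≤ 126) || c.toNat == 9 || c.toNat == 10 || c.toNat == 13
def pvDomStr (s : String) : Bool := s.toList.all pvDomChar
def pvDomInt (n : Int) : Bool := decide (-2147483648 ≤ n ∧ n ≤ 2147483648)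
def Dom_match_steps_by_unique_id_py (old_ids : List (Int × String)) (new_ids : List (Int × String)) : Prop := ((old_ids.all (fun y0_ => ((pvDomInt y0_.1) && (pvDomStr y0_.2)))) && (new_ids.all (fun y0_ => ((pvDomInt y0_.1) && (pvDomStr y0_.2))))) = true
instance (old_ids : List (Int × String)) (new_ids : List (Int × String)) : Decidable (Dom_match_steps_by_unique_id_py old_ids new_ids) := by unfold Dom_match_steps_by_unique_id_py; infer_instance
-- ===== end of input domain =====

-- B replaces A's per-side count/first-seen dict bookkeeping with a sort of each side's items by
-- entity, a run-length scan keeping length-1 runs, and a two-pointer merge of the two sorted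
-- unique lists; objective: alternative (sort-and-merge instead of hashing), same result.

-- Shared input decoding: the Python parameters are dicts; an association list becomes a dict
-- (first position of a key, last value) before either function iterates `.items()`.
def pvDictItems (xs : List (Int × String)) : List (Int × String) := (PySem.Dict.ofList xs).items

-- ===== PORT A =====
def match_steps_by_unique_id_py (old_ids : List (Int × String)) (new_ids : List (Int × String)) : List (Int × Int) :=
  -- one loop per side carrying the pair (counts, first); counts[e] = counts.get(e,0)+1, first.setdefault(e, step)
  let os := (pvDictItems old_ids).foldl
      (fun (s : PySem.Dict String Int × PySem.Dict String Int) p =>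
        (s.1.insert p.2 (s.1.getD p.2 0 + 1), s.2.setdefault p.2 p.1))
      (PySem.Dict.empty, PySem.Dict.empty)
  let ns := (pvDictItems new_ids).foldl
      (fun (s : PySem.Dict String Int × PySem.Dict String Int) p =>
        (s.1.insert p.2 (s.1.getD p.2 0 + 1), s.2.setdefault p.2 p.1))
      (PySem.Dict.empty, PySem.Dict.empty)
  -- sorted(set(old_counts) & set(new_counts))
  let ents := PySem.List.sorted (PySem.Set.inter (PySem.Set.ofList os.1.keys) (PySem.Set.ofList ns.1.keys)) (fun x => x) false
  -- old_counts[e] / old_first[e]: e is in both dicts here, so the plain [] lookup is getD with a dummy default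
  let pairs : PySem.Dict Int Int := ents.foldl
      (fun pr e =>
        if os.1.getD e 0 == 1 && ns.1.getD e 0 == 1 then
          pr.insert (os.2.getD e 0) (ns.2.getD e 0)
        else pr)
      PySem.Dict.empty
  pairs.items

-- ===== PORT B =====
-- outer while loop of unique_pairs: i jumps to the end of the current run (j); the run past the
-- head is rest.takeWhile, so 'j == i + 1' is 'nothing dropped', i.e. dropWhile keeps all of rest
def pvUniqScan : List (Int × String) → List (String × Int)
  | [] => []
  | p :: rest =>
    if (rest.dropWhile (fun q => q.2 == p.2)).length == rest.length then
      (p.2, p.1) :: pvUniqScan (rest.dropWhile (fun q => q.2 == p.2))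
    else pvUniqScan (rest.dropWhile (fun q => q.2 == p.2))
  termination_by l => l.length
  decreasing_by
    all_goals simp only [List.length_cons]
    all_goals have := List.length_dropWhile_le (fun q => q.2 == p.2) rest
    all_goals omega

-- the two-pointer merge loop over the two entity-sorted unique lists
def pvMerge : List (String × Int) → List (String × Int) → List (Int × Int)
  | [], _ => []
  | _ :: _, [] => []
  | (eo, so) :: os, (en, sn) :: ns =>
    if eo < en then pvMerge os ((en, sn) :: ns)
    else if en < eo then pvMerge ((eo, so) :: os) ns
    else (so, sn) :: pvMerge os ns

def match_steps_by_unique_id_py_alt (old_ids : List (Int × String)) (new_ids : List (Int × String)) : List (Int × Int) :=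
  let olds := pvUniqScan (PySem.List.sorted (pvDictItems old_ids) (fun kv => kv.2) false)
  let news := pvUniqScan (PySem.List.sorted (pvDictItems new_ids) (fun kv => kv.2) false)
  (PySem.Dict.ofList (pvMerge olds news)).items

-- ===== PRECONDITION & SPEC =====
def Spec_match_steps_by_unique_id_py (old_ids : List (Int × String)) (new_ids : List (Int × String)) (out : List (Int × Int)) : Prop := out = match_steps_by_unique_id_py_alt old_ids new_ids
instance (old_ids : List (Int × String)) (new_ids : List (Int × String)) (out : List (Int × Int)) : Decidable (Spec_match_steps_by_unique_id_py old_ids new_ids out) := by unfold Spec_match_steps_by_unique_id_py; infer_instance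

-- ===== CLAIM (what is proved, stated in full; the proofs are below) =====
def Claim_equal_match_steps_by_unique_id_py : Prop := ∀ (old_ids : List (Int × String)) (new_ids : List (Int × String)), Dom_match_steps_by_unique_id_py old_ids new_ids → Spec_match_steps_by_unique_id_py old_ids new_ids (match_steps_by_unique_id_py old_ids new_ids)

-- ===== LEMMAS AND PROOFS =====

-- number of items of a side carrying entity e
def pvCnt (l : List (Int × String)) (e : String) : Nat := l.countP (fun p => p.2 == e)

-- the unique-run scan applied to a side's items sorted by entity
def pvUniq (l : List (Int × String)) : List (String × Int) :=
  pvUniqScan (PySem.List.sorted l (fun kv => kv.2) false)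

-- the step id of the first (hence, when pvCnt = 1, only) item carrying entity e
def pvStep (l : List (Int × String)) (e : String) : Int :=
  ((l.find? (fun p => p.2 == e)).map (·.1)).getD 0

-- A's counts dict holds, per entity, the number of items with that entity
lemma pv_counts_getD (l : List (Int × String)) (e : String) :
    (l.foldl (fun d p => d.insert p.2 (d.getD p.2 0 + 1)) (PySem.Dict.empty : PySem.Dict String Int)).getD e 0
      = ((l.filter (fun p => p.2 == e)).length : Int) := by
  have h := PySem.Dict.getD_foldl_insert_add_one (l.map (·.2)) (PySem.Dict.empty : PySem.Dict String Int) e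
  rw [List.foldl_map] at h
  simp only [h, PySem.Dict.getD_empty, List.count_eq_countP, List.countP_eq_length_filter, zero_add]
  rw [← List.countP_eq_length_filter, ← List.countP_eq_length_filter, List.countP_map]
  rfl

-- A's first dict holds the first step id with that entity
lemma pv_first_get? (l : List (Int × String)) (d : PySem.Dict String Int) (e : String) :
    (l.foldl (fun d p => d.setdefault p.2 p.1) d).get? e
      = (d.get? e).or ((l.find? (fun p => p.2 == e)).map (·.1)) := by
  induction l generalizing d with
  | nil => simp
  | cons p l ih =>
    simp only [List.foldl_cons, ih]
    by_cases hpe : p.2 = e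
    · rw [List.find?_cons_of_pos (by simp [hpe])]
      have : (d.setdefault p.2 p.1).get? e = some ((d.get? e).getD p.1) := by
        rw [← hpe]; exact PySem.Dict.get?_setdefault_self d p.2 p.1
      rw [this]
      cases d.get? e <;> simp
    · rw [List.find?_cons_of_neg (by simp [hpe]),
        PySem.Dict.get?_setdefault_of_ne d p.1 (fun h => hpe h.symm)]

-- keys of A's counts dict = the set of entities of the side
lemma pv_counts_keys (l : List (Int × String)) :
    (l.foldl (fun d p => d.insert p.2 (d.getD p.2 0 + 1)) (PySem.Dict.empty : PySem.Dict String Int)).keys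
      = PySem.Set.ofList (l.map (·.2)) := by
  rw [PySem.Dict.keys_foldl_insert_key l (fun p => p.2) (fun d p => d.getD p.2 0 + 1)]
  simp [PySem.Dict.keys_empty, PySem.Set.update, PySem.Set.ofList_eq_foldl]

-- a conditional-insert loop builds the dict of the filterMapped pair list
lemma pv_foldl_cond_insert (l : List String) (c : String → Bool) (k v : String → Int)
    (d : PySem.Dict Int Int) :
    l.foldl (fun pr e => if c e then pr.insert (k e) (v e) else pr) d
      = (l.filterMap (fun e => if c e then some (k e, v e) else none)).foldl
          (fun pr p => pr.insert p.1 p.2) d := by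
  induction l generalizing d with
  | nil => rfl
  | cons e l ih => by_cases h : c e <;> simp [h, ih]

-- filterMap of an if-then-some is filter-then-map
lemma pv_filterMap_if {α β : Type} (l : List α) (c : α → Bool) (f : α → β) :
    l.filterMap (fun a => if c a then some (f a) else none) = (l.filter c).map f := by
  induction l with
  | nil => rfl
  | cons a l ih => by_cases h : c a <;> simp [h, ih]

-- filterMap as filter-by-isSome then map (any default)
lemma pv_filterMap_eq_filter_map {α β : Type} (f : α → Option β) (d : β) (l : List α) :
    l.filterMap f = (l.filter (fun a => (f a).isSome)).map (fun a => (f a).getD d) := by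
  induction l with
  | nil => rfl
  | cons a l ih => cases h : f a <;> simp [h, ih]

-- when pvCnt l e = 1, the side holds exactly one item with entity e, and find? returns it
lemma pv_cnt_one (l : List (Int × String)) (e : String) (h : pvCnt l e = 1) :
    ∃ x, l.filter (fun p => p.2 == e) = [x] ∧ l.find? (fun p => p.2 == e) = some x ∧ x.2 = e := by
  unfold pvCnt at h
  rw [List.countP_eq_length_filter] at h
  obtain ⟨x, hx⟩ := List.length_eq_one_iff.mp h
  refine ⟨x, hx, ?_, ?_⟩
  · rw [← List.head?_filter, hx]; rfl
  · have : x ∈ l.filter (fun p => p.2 == e) := by simp [hx]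
    simpa using (List.mem_filter.mp this).2

lemma pv_mem_of_cnt_one (l : List (Int × String)) (e : String) (h : pvCnt l e = 1)
    (s : Int) : (s, e) ∈ l ↔ s = pvStep l e := by
  obtain ⟨x, hfil, hfind, hxe⟩ := pv_cnt_one l e h
  constructor
  · intro hm
    have : (s, e) ∈ l.filter (fun p => p.2 == e) := List.mem_filter.mpr ⟨hm, by simp⟩
    rw [hfil, List.mem_singleton] at this
    simp [pvStep, hfind, ← this]
  · intro hs
    have hx : x ∈ l := by
      have : x ∈ l.filter (fun p => p.2 == e) := by simp [hfil]
      exact (List.mem_filter.mp this).1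
    have : (s, e) = x := by
      simp [pvStep, hfind] at hs
      exact Prod.ext (by simpa using hs) (by simpa using hxe.symm)
    rwa [this]

-- characterisation of the run scan on an entity-sorted list
lemma pv_drop_lt (p : Int × String) (rest : List (Int × String))
    (hs : (p :: rest).Pairwise (fun a b => a.2 ≤ b.2)) :
    ∀ q ∈ rest.dropWhile (fun q => q.2 == p.2), p.2 < q.2 := by
  obtain ⟨hp2, hrest⟩ := List.pairwise_cons.mp hs
  have hdP : (rest.dropWhile (fun q => q.2 == p.2)).Pairwise (fun a b => a.2 ≤ b.2) :=
    hrest.sublist (List.dropWhile_sublist _)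
  cases hd : rest.dropWhile (fun q => q.2 == p.2) with
  | nil => simp
  | cons q0 ds =>
    have hq0f : (q0.2 == p.2) = false := by
      have := List.head?_dropWhile_not (fun q => q.2 == p.2) rest
      rw [hd] at this
      simpa only [List.head?_cons] using this
    have hq0r : q0 ∈ rest := (List.dropWhile_sublist _).subset (hd ▸ List.mem_cons_self)
    have hq0lt : p.2 < q0.2 := lt_of_le_of_ne (hp2 _ hq0r) (Ne.symm (beq_eq_false_iff_ne.mp hq0f))
    have hds : (q0 :: ds).Pairwise (fun a b => a.2 ≤ b.2) := hd ▸ hdP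
    intro q hq
    rcases List.mem_cons.mp hq with h | h
    · exact h ▸ hq0lt
    · exact lt_of_lt_of_le hq0lt ((List.pairwise_cons.mp hds).1 _ h)

lemma pv_uniq_cons (p : Int × String) (rest : List (Int × String))
    (hs : (p :: rest).Pairwise (fun a b => a.2 ≤ b.2))
    (ih : pvUniqScan (rest.dropWhile (fun q => q.2 == p.2))
      = ((rest.dropWhile (fun q => q.2 == p.2)).filter
          (fun x => (rest.dropWhile (fun q => q.2 == p.2)).countP (fun q => q.2 == x.2) == 1)).map
          (fun x => (x.2, x.1))) :
    pvUniqScan (p :: rest)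
      = ((p :: rest).filter (fun x => (p :: rest).countP (fun q => q.2 == x.2) == 1)).map
          (fun x => (x.2, x.1)) := by
  obtain ⟨hp2, hrest⟩ := List.pairwise_cons.mp hs
  set t := rest.takeWhile (fun q => q.2 == p.2) with ht
  set d := rest.dropWhile (fun q => q.2 == p.2) with hdd
  have htd : t ++ d = rest := List.takeWhile_append_dropWhile
  have hdlt : ∀ q ∈ d, p.2 < q.2 := pv_drop_lt p rest hs
  have htm : ∀ q ∈ t, q.2 = p.2 := fun q hq => by simpa using List.mem_takeWhile_imp hq
  have hlen : t.length + d.length = rest.length := by rw [← htd, List.length_append]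
  have cP_t : t.countP (fun q => q.2 == p.2) = t.length :=
    List.countP_eq_length.mpr (fun q hq => by simp [htm q hq])
  have cP_d : d.countP (fun q => q.2 == p.2) = 0 :=
    List.countP_eq_zero.mpr (fun q hq => by simp [ne_of_gt (hdlt q hq)])
  have cs : (p :: rest).countP (fun q => q.2 == p.2) = 1 + t.length := by
    rw [← htd]
    simp [List.countP_append, cP_t, cP_d]; omega
  have csd : ∀ q ∈ d, (p :: rest).countP (fun r => r.2 == q.2) = d.countP (fun r => r.2 == q.2) := by
    intro q hq
    have hpq : (p.2 == q.2) = false := by simp [ne_of_lt (hdlt q hq)]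
    have ct0 : t.countP (fun r => r.2 == q.2) = 0 :=
      List.countP_eq_zero.mpr (fun r hr => by simp [htm r hr, ne_of_lt (hdlt q hq)])
    rw [← htd]
    simp [List.countP_append, ct0, hpq]
  have hfd : d.filter (fun x => (p :: rest).countP (fun q => q.2 == x.2) == 1)
      = d.filter (fun x => d.countP (fun q => q.2 == x.2) == 1) :=
    List.filter_congr (fun x hx => by rw [csd x hx])
  by_cases hc : ((d.length == rest.length) = true)
  · -- nothing dropped: t = [], rest = d
    have ht0 : t = [] := by
      have : d.length = rest.length := by simpa using hc
      have : t.length = 0 := by omega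
      exact List.length_eq_zero_iff.mp this
    have hrd : rest = d := by rw [← htd, ht0, List.nil_append]
    have hkp : ((p :: rest).countP (fun q => q.2 == p.2) == 1) = true := by
      simp [cs, ht0]
    rw [show pvUniqScan (p :: rest) = (p.2, p.1) :: pvUniqScan d from by
      rw [pvUniqScan]; rw [if_pos hc]]
    simp only [List.filter_cons, hkp, if_true, List.map_cons]
    congr 1
    rw [hrd] at hfd ⊢
    rw [hfd]
    exact ih
  · -- a run of length ≥ 2: head is dropped, so is the whole run
    have ht1 : 1 ≤ t.length := by
      rcases Nat.eq_zero_or_pos t.length with h0 | h1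
      · exfalso; apply hc; simp; omega
      · exact h1
    have hkp : ((p :: rest).countP (fun q => q.2 == p.2) == 1) = false := by
      rw [cs]; simp only [beq_eq_false_iff_ne]; omega
    have hft : t.filter (fun x => (p :: rest).countP (fun q => q.2 == x.2) == 1) = [] := by
      apply List.filter_eq_nil_iff.mpr
      intro x hx hbad
      simp only [beq_iff_eq] at hbad
      rw [show (fun q : Int × String => q.2 == x.2) = (fun q : Int × String => q.2 == p.2) from by
        funext q; rw [htm x hx], cs] at hbad
      omega
    have key : ∀ (K : Int × String → Bool), t.filter K = [] →
        d.filter K = d.filter (fun x => d.countP (fun q => q.2 == x.2) == 1) →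
        rest.filter K = d.filter (fun x => d.countP (fun q => q.2 == x.2) == 1) := by
      intro K h1 h2
      rw [← htd, List.filter_append, h1, List.nil_append, h2]
    rw [show pvUniqScan (p :: rest) = pvUniqScan d from by rw [pvUniqScan]; rw [if_neg hc]]
    rw [List.filter_cons_of_neg (by simp only [hkp]; exact Bool.false_ne_true)]
    rw [key _ hft hfd]
    exact ih

lemma pv_uniqScan_eq (s : List (Int × String)) (hs : s.Pairwise (fun a b => a.2 ≤ b.2)) :
    pvUniqScan s
      = (s.filter (fun p => s.countP (fun q => q.2 == p.2) == 1)).map (fun p => (p.2, p.1)) := by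
  induction s using pvUniqScan.induct with
  | case1 => simp [pvUniqScan]
  | case2 p rest hcond ih =>
    exact pv_uniq_cons p rest hs (ih ((List.pairwise_cons.mp hs).2.sublist (List.dropWhile_sublist _)))
  | case3 p rest hcond ih =>
    exact pv_uniq_cons p rest hs (ih ((List.pairwise_cons.mp hs).2.sublist (List.dropWhile_sublist _)))

-- characterisation of the two-pointer merge on key-strictly-sorted lists
lemma pv_merge_eq (sA sB : List (String × Int))
    (hA : sA.Pairwise (fun a b => a.1 < b.1)) (hB : sB.Pairwise (fun a b => a.1 < b.1)) :
    pvMerge sA sB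
      = sA.filterMap (fun a => (sB.find? (fun b => b.1 == a.1)).map (fun b => (a.2, b.2))) := by
  induction sA, sB using pvMerge.induct with
  | case1 sB => simp [pvMerge]
  | case2 a os => simp [pvMerge]
  | case3 eo so os en sn ns hlt ih =>
    obtain ⟨hAo, hA'⟩ := List.pairwise_cons.mp hA
    rw [show pvMerge ((eo, so) :: os) ((en, sn) :: ns) = pvMerge os ((en, sn) :: ns) from by
      rw [pvMerge, if_pos hlt]]
    rw [ih hA' hB, List.filterMap_cons]
    have hnone : ((en, sn) :: ns).find? (fun b => b.1 == eo) = none := by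
      apply List.find?_eq_none.mpr
      intro b hb
      rcases List.mem_cons.mp hb with h | h
      · simp [h, ne_of_gt hlt]
      · have : en < b.1 := (List.pairwise_cons.mp hB).1 b h
        simp [ne_of_gt (lt_trans hlt this)]
    simp [hnone]
  | case4 eo so os en sn ns hlt hlt2 ih =>
    obtain ⟨hBn, hB'⟩ := List.pairwise_cons.mp hB
    rw [show pvMerge ((eo, so) :: os) ((en, sn) :: ns) = pvMerge ((eo, so) :: os) ns from by
      rw [pvMerge, if_neg hlt, if_pos hlt2]]
    rw [ih hA hB']
    apply (List.filterMap_congr _).symm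
    intro a ha
    have hena : en < a.1 := by
      rcases List.mem_cons.mp ha with h | h
      · rw [h]; exact hlt2
      · exact lt_trans hlt2 ((List.pairwise_cons.mp hA).1 a h)
    rw [List.find?_cons_of_neg (by simp; exact ne_of_lt hena)]
  | case5 eo so os en sn ns hlt hlt2 ih =>
    have heq : en = eo := le_antisymm (not_lt.mp hlt) (not_lt.mp hlt2)
    obtain ⟨hAo, hA'⟩ := List.pairwise_cons.mp hA
    obtain ⟨hBn, hB'⟩ := List.pairwise_cons.mp hB
    rw [show pvMerge ((eo, so) :: os) ((en, sn) :: ns) = (so, sn) :: pvMerge os ns from by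
      rw [pvMerge, if_neg hlt, if_neg hlt2]]
    rw [ih hA' hB', List.filterMap_cons]
    rw [List.find?_cons_of_pos (by simp [heq])]
    simp only [Option.map_some]
    congr 1
    apply List.filterMap_congr
    intro a ha
    have : en < a.1 := heq ▸ hAo a ha
    rw [List.find?_cons_of_neg (by simp; exact ne_of_lt this)]

-- membership in the unique list
lemma pv_mem_uniq (l : List (Int × String)) (e : String) (s : Int) :
    (e, s) ∈ pvUniq l ↔ (s, e) ∈ l ∧ pvCnt l e = 1 := by
  have hperm := PySem.List.sorted_perm l (fun kv : Int × String => kv.2) false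
  rw [pvUniq, pv_uniqScan_eq _ (PySem.List.sorted_pairwise l (fun kv : Int × String => kv.2))]
  constructor
  · intro hm
    obtain ⟨p, hp, hpe⟩ := List.mem_map.mp hm
    obtain ⟨hpS, hpK⟩ := List.mem_filter.mp hp
    have hps : p = (s, e) := by
      have h1 : p.2 = e := congrArg Prod.fst hpe
      have h2 : p.1 = s := congrArg Prod.snd hpe
      exact Prod.ext h2 h1
    subst hps
    refine ⟨hperm.mem_iff.mp hpS, ?_⟩
    have := (beq_iff_eq).mp hpK
    rwa [hperm.countP_eq] at this
  · rintro ⟨hmem, hcnt⟩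
    apply List.mem_map.mpr
    refine ⟨(s, e), List.mem_filter.mpr ⟨hperm.mem_iff.mpr hmem, ?_⟩, rfl⟩
    rw [beq_iff_eq, hperm.countP_eq]
    exact hcnt

-- pairwise ≤ on a list whose kept elements each carry a key occurring once is strict
lemma pv_uniq_pairwise (l : List (Int × String)) :
    (pvUniq l).Pairwise (fun a b => a.1 < b.1) := by
  have hS := PySem.List.sorted_pairwise l (fun kv : Int × String => kv.2)
  rw [pvUniq, pv_uniqScan_eq _ hS]
  set S := PySem.List.sorted l (fun kv : Int × String => kv.2) false with hSdef
  rw [List.pairwise_map]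
  rw [List.pairwise_iff_forall_sublist]
  intro a b hsub
  have hsubS : [a, b].Sublist S := hsub.trans List.filter_sublist
  have hle : a.2 ≤ b.2 := List.pairwise_iff_forall_sublist.mp hS hsubS
  rcases lt_or_eq_of_le hle with h | h
  · exact h
  · exfalso
    have ha := (List.mem_filter.mp (hsub.subset (List.mem_cons_self))).2
    have hcnt2 : 2 ≤ S.countP (fun q => q.2 == a.2) := by
      have : ([a, b].countP (fun q => q.2 == a.2)) = 2 := by
        simp [h]
      calc 2 = [a, b].countP (fun q => q.2 == a.2) := this.symm
        _ ≤ S.countP (fun q => q.2 == a.2) := hsubS.countP_le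
    rw [beq_iff_eq] at ha
    omega

-- two lists strictly sorted under a key and with the same members are equal
lemma pv_eq_of_mem_iff {α κ : Type} [LinearOrder κ] (key : α → κ) (l₁ l₂ : List α)
    (h₁ : l₁.Pairwise (fun a b => key a < key b)) (h₂ : l₂.Pairwise (fun a b => key a < key b))
    (hm : ∀ x, x ∈ l₁ ↔ x ∈ l₂) : l₁ = l₂ := by
  have nd : ∀ (l : List α), l.Pairwise (fun a b => key a < key b) → l.Nodup := by
    intro l hl
    exact hl.imp (fun h heq => absurd (heq ▸ h) (lt_irrefl _))
  have hp : l₁.Perm l₂ := (List.perm_ext_iff_of_nodup (nd _ h₁) (nd _ h₂)).2 hm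
  exact hp.eq_of_pairwise (fun a b _ _ hab hba => absurd (lt_trans hab hba) (lt_irrefl _)) h₁ h₂

-- a once-occurring entity is among the side's entities
lemma pv_cnt_mem_entities (l : List (Int × String)) (e : String) (h : pvCnt l e = 1) :
    e ∈ l.map (fun p => p.2) := by
  obtain ⟨x, hfil, hfind, hxe⟩ := pv_cnt_one l e h
  exact List.mem_map.mpr ⟨x, List.mem_of_find?_eq_some hfind, hxe⟩

-- the first-seen dict's entry for a once-occurring entity is its step
lemma pv_firstD (l : List (Int × String)) (e : String) (h : pvCnt l e = 1) :
    (l.foldl (fun d p => d.setdefault p.2 p.1) (PySem.Dict.empty : PySem.Dict String Int)).getD e 0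
      = pvStep l e := by
  obtain ⟨x, hfil, hfind, hxe⟩ := pv_cnt_one l e h
  rw [PySem.Dict.getD_eq_get?_getD, pv_first_get?, PySem.Dict.get?_empty]
  simp [hfind, pvStep]

-- pairwise ≤ plus no duplicates is pairwise <
lemma pv_lt_of_le_nodup {α : Type} [LinearOrder α] (l : List α)
    (hle : l.Pairwise (fun a b => a ≤ b)) (hnd : l.Nodup) : l.Pairwise (fun a b => a < b) := by
  rw [List.pairwise_iff_forall_sublist]
  intro a b hsub
  have h1 : a ≤ b := List.pairwise_iff_forall_sublist.mp hle hsub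
  have h2 : a ≠ b := List.pairwise_iff_forall_sublist.mp hnd hsub
  exact lt_of_le_of_ne h1 h2

-- the merge's lookup into the other unique list succeeds exactly on once-occurring entities
lemma pv_find_isSome (l : List (Int × String)) (e : String) :
    ((pvUniq l).find? (fun b => b.1 == e)).isSome ↔ pvCnt l e = 1 := by
  rw [List.find?_isSome]
  constructor
  · rintro ⟨b, hb, hpb⟩
    have hb1 : b.1 = e := by simpa using hpb
    have hmu := (pv_mem_uniq l b.1 b.2).mp (by rwa [Prod.mk.eta])
    rw [hb1] at hmu
    exact hmu.2
  · intro h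
    obtain ⟨x, hfil, hfind, hxe⟩ := pv_cnt_one l e h
    refine ⟨(e, x.1), (pv_mem_uniq l e x.1).mpr ⟨?_, h⟩, by simp⟩
    have hxx : (x.1, e) = x := by rw [← hxe]
    rw [hxx]
    exact List.mem_of_find?_eq_some hfind

theorem pv_main (old_ids new_ids : List (Int × String)) :
    match_steps_by_unique_id_py old_ids new_ids = match_steps_by_unique_id_py_alt old_ids new_ids := by
  unfold match_steps_by_unique_id_py match_steps_by_unique_id_py_alt
  rw [PySem.List.foldl_prod_mk (f := fun d (p : Int × String) => PySem.Dict.insert d p.2 (d.getD p.2 0 + 1))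
      (g := fun d (p : Int × String) => PySem.Dict.setdefault d p.2 p.1),
    PySem.List.foldl_prod_mk (f := fun d (p : Int × String) => PySem.Dict.insert d p.2 (d.getD p.2 0 + 1))
      (g := fun d (p : Int × String) => PySem.Dict.setdefault d p.2 p.1)]
  dsimp only
  set lo := pvDictItems old_ids with hlo
  set ln := pvDictItems new_ids with hln
  have hU : ∀ l : List (Int × String),
      pvUniqScan (PySem.List.sorted l (fun kv => kv.2) false) = pvUniq l := fun _ => rfl
  rw [hU, hU]
  set cO := lo.foldl (fun d p => d.insert p.2 (d.getD p.2 0 + 1)) (PySem.Dict.empty : PySem.Dict String Int) with hcO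
  set cN := ln.foldl (fun d p => d.insert p.2 (d.getD p.2 0 + 1)) (PySem.Dict.empty : PySem.Dict String Int) with hcN
  set fO := lo.foldl (fun d p => d.setdefault p.2 p.1) (PySem.Dict.empty : PySem.Dict String Int) with hfO
  set fN := ln.foldl (fun d p => d.setdefault p.2 p.1) (PySem.Dict.empty : PySem.Dict String Int) with hfN
  set ents := PySem.List.sorted (PySem.Set.inter (PySem.Set.ofList cO.keys) (PySem.Set.ofList cN.keys)) (fun x => x) false with hents
  rw [pv_foldl_cond_insert ents (fun e => cO.getD e 0 == 1 && cN.getD e 0 == 1)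
    (fun e => fO.getD e 0) (fun e => fN.getD e 0) PySem.Dict.empty]
  rw [show ((ents.filterMap (fun e => if cO.getD e 0 == 1 && cN.getD e 0 == 1 then
        some (fO.getD e 0, fN.getD e 0) else none)).foldl
      (fun pr p => pr.insert p.1 p.2) PySem.Dict.empty)
    = PySem.Dict.ofList (ents.filterMap (fun e => if cO.getD e 0 == 1 && cN.getD e 0 == 1 then
        some (fO.getD e 0, fN.getD e 0) else none)) from rfl]
  congr 1
  -- both pair lists, entity by entity
  rw [pv_merge_eq _ _ (pv_uniq_pairwise lo) (pv_uniq_pairwise ln)]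
  rw [pv_filterMap_if ents (fun e => cO.getD e 0 == 1 && cN.getD e 0 == 1)
    (fun e => (fO.getD e 0, fN.getD e 0))]
  rw [pv_filterMap_eq_filter_map
    (f := fun a : String × Int => ((pvUniq ln).find? (fun b => b.1 == a.1)).map (fun b => (a.2, b.2)))
    (d := ((0 : Int), (0 : Int))) (l := pvUniq lo)]
  -- normalise A's filter condition to the two occurrence counts
  have hcondA : ∀ e, (cO.getD e 0 == 1 && cN.getD e 0 == 1)
      = (pvCnt lo e == 1 && pvCnt ln e == 1) := by
    intro e
    rw [hcO, hcN, pv_counts_getD, pv_counts_getD, Bool.eq_iff_iff]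
    simp only [Bool.and_eq_true, beq_iff_eq, pvCnt, List.countP_eq_length_filter]
    omega
  rw [List.filter_congr (fun e _ => hcondA e)]
  -- A's values on kept entities are the unique steps
  rw [List.map_congr_left (l := ents.filter (fun e => pvCnt lo e == 1 && pvCnt ln e == 1))
    (f := fun e => (fO.getD e 0, fN.getD e 0)) (g := fun e => (pvStep lo e, pvStep ln e))
    (by
      intro e he
      dsimp only
      have hk := (List.mem_filter.mp he).2
      simp only [Bool.and_eq_true, beq_iff_eq] at hk
      rw [hfO, hfN, pv_firstD lo e hk.1, pv_firstD ln e hk.2])]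
  -- B's values on kept unique items are the other side's unique steps
  rw [List.map_congr_left
    (l := (pvUniq lo).filter (fun a => ((pvUniq ln).find? (fun b => b.1 == a.1)).map (fun b => (a.2, b.2)) |>.isSome))
    (f := fun a => (((pvUniq ln).find? (fun b => b.1 == a.1)).map (fun b => (a.2, b.2))).getD ((0 : Int), (0 : Int)))
    (g := fun a => (a.2, pvStep ln a.1))
    (by
      intro a ha
      dsimp only
      have hk := (List.mem_filter.mp ha).2
      rw [Option.isSome_map] at hk
      obtain ⟨b, hb⟩ := Option.isSome_iff_exists.mp hk
      have hbmem : b ∈ pvUniq ln := List.mem_of_find?_eq_some hb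
      have hb1 : b.1 = a.1 := by simpa using List.find?_some hb
      have hmu := (pv_mem_uniq ln b.1 b.2).mp (by rwa [Prod.mk.eta])
      rw [hb1] at hmu
      have hbv : b.2 = pvStep ln a.1 := (pv_mem_of_cnt_one ln a.1 hmu.2 b.2).mp hmu.1
      rw [hb, Option.map_some, Option.getD_some, hbv])]
  -- it remains to identify the two kept, entity-sorted lists
  have hX : (pvUniq lo).filter (fun a => ((pvUniq ln).find? (fun b => b.1 == a.1)).map (fun b => (a.2, b.2)) |>.isSome)
      = (pvUniq lo).filter (fun a => ((pvUniq ln).find? (fun b => b.1 == a.1)).isSome) := by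
    apply List.filter_congr
    intro a _
    rw [Option.isSome_map]
  rw [hX]
  have hkey : (pvUniq lo).filter (fun a => ((pvUniq ln).find? (fun b => b.1 == a.1)).isSome)
      = (ents.filter (fun e => pvCnt lo e == 1 && pvCnt ln e == 1)).map (fun e => (e, pvStep lo e)) := by
    apply pv_eq_of_mem_iff (fun a : String × Int => a.1)
    · exact (pv_uniq_pairwise lo).filter _
    · rw [List.pairwise_map]
      apply List.Pairwise.filter
      apply pv_lt_of_le_nodup
      · exact PySem.List.sorted_pairwise _ _
      · have hnd : (PySem.Set.inter (PySem.Set.ofList cO.keys) (PySem.Set.ofList cN.keys)).Nodup :=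
          PySem.Set.nodup_inter _ _ (PySem.Set.nodup_ofList _)
        exact (PySem.List.sorted_perm _ _ _).nodup_iff.mpr hnd
    · intro x
      have hments : ∀ e, e ∈ ents ↔ e ∈ lo.map (fun p => p.2) ∧ e ∈ ln.map (fun p => p.2) := by
        intro e
        rw [hents, PySem.List.mem_sorted, PySem.Set.mem_inter, PySem.Set.mem_ofList,
          PySem.Set.mem_ofList, hcO, hcN, pv_counts_keys, pv_counts_keys,
          PySem.Set.mem_ofList, PySem.Set.mem_ofList]
      constructor
      · intro hx
        obtain ⟨hx1, hx2⟩ := List.mem_filter.mp hx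
        have hmu := (pv_mem_uniq lo x.1 x.2).mp (by rwa [Prod.mk.eta])
        have hcnt2 : pvCnt ln x.1 = 1 := (pv_find_isSome ln x.1).mp hx2
        apply List.mem_map.mpr
        refine ⟨x.1, List.mem_filter.mpr ⟨(hments x.1).mpr
          ⟨pv_cnt_mem_entities lo x.1 hmu.2, pv_cnt_mem_entities ln x.1 hcnt2⟩, by
            simp only [Bool.and_eq_true, beq_iff_eq]; exact ⟨hmu.2, hcnt2⟩⟩, ?_⟩
        have hv : x.2 = pvStep lo x.1 := (pv_mem_of_cnt_one lo x.1 hmu.2 x.2).mp hmu.1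
        rw [← hv, Prod.mk.eta]
      · intro hx
        obtain ⟨e, he, hex⟩ := List.mem_map.mp hx
        obtain ⟨hee, hec⟩ := List.mem_filter.mp he
        simp only [Bool.and_eq_true, beq_iff_eq] at hec
        apply List.mem_filter.mpr
        constructor
        · rw [← hex]
          exact (pv_mem_uniq lo e (pvStep lo e)).mpr
            ⟨(pv_mem_of_cnt_one lo e hec.1 (pvStep lo e)).mpr rfl, hec.1⟩
        · rw [← hex]
          exact (pv_find_isSome ln e).mpr hec.2
  rw [hkey, List.map_map]
  rfl

-- ===== VERDICT (by name: the statement is the Claim_ definition above) =====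
theorem match_steps_by_unique_id_py_spec : Claim_equal_match_steps_by_unique_id_py := by
  intro old_ids new_ids _
  unfold Spec_match_steps_by_unique_id_py
  exact pv_main old_ids new_ids
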